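-- pv_equiv track=rewrite | github.com/sourcehaven/mypass-cli | mypass/completer.py | find_reverse_substring_index
-- ===== SOURCE A (Python) =====
-- def find_reverse_substring_index(text: str, word: str):
--     word_len = len(word)
--     for i in range(word_len):
--         sub_word = word[:word_len - i]
--         index = text.rfind(sub_word)
--         if index != -1:
--             return index - len(text)
--     return 0
-- ===== SOURCE B (Python) =====
-- def _lcp(w, s):
--     l = 0
--     for a, b in zip(w, s):
--         if a != b:
--             break
--         l += 1
--     return l
--
--
-- def find_reverse_substring_index(text, word):
--     # One left-to-right scan: at each start j keep the longest prefix of `word`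
--     # matching there; '>=' keeps the rightmost start among equally long matches.
--     best_len = 0
--     best_j = 0
--     for j in range(len(text)):
--         l = _lcp(word, text[j:])
--         if 0 < l and best_len <= l:
--             best_len, best_j = l, j
--     return best_j - len(text) if best_len else 0
-- ===== Notes on version B (the rewrite author's own statement) =====
-- stated objective: alternative
-- what changed: Replaces A's outer loop over shrinking word prefixes with a repeated C-level rfind scan by a single left-to-right pass over start positions that tracks the longest common-prefix match and its rightmost start.
import Mathlib
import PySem

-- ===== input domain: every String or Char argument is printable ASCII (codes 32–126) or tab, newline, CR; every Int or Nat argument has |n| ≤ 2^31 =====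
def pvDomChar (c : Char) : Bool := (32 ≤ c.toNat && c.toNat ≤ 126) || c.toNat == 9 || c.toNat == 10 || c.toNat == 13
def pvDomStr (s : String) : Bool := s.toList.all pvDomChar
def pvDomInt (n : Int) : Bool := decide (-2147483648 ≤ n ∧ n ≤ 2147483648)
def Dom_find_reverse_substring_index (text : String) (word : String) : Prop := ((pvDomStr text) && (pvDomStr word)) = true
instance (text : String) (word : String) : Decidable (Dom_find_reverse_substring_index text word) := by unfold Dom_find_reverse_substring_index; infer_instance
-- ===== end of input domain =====

-- B replaces A's loop over shrinking word prefixes (each probed with a full rfind scan)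
-- by a single left-to-right scan tracking the longest common-prefix match and its
-- rightmost start (alternative decomposition; no speed claim).

-- ===== PORT A =====
-- the early-return of A's loop body: a set accumulator is passed through unchanged
def pvStep (g : Int → Option Int) (acc : Option Int) (i : Int) : Option Int :=
  match acc with
  | some v => some v
  | none => g i

-- for i in range(word_len): sub = word[:word_len-i]; idx = text.rfind(sub); if idx != -1: return idx - len(text); return 0
def find_reverse_substring_index (text : String) (word : String) : Int :=
  let t := text.toList
  let w := word.toList
  let word_len : Nat := w.length
  let r : Option Int :=
    (PySem.List.pyRange 0 (word_len : Int)).foldl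
      (pvStep (fun i =>
          let sub_word := PySem.List.slice w none (some ((word_len : Int) - i))
          let index := PySem.Chars.rfind t sub_word
          if index ≠ -1 then some (index - (t.length : Int)) else none))
      none
  r.getD 0

-- ===== PORT B =====
-- _lcp: the zip loop with break
def pvLcp : List Char → List Char → Nat
  | a :: as, b :: bs => if a ≠ b then 0 else pvLcp as bs + 1
  | _, _ => 0

def find_reverse_substring_index_alt (text : String) (word : String) : Int :=
  let t := text.toList
  let w := word.toList
  let st :=
    (List.range t.length).foldl
      (fun bb j =>
        let l := pvLcp w (t.drop j)
        if 0 < l ∧ bb.1 ≤ l then (l, j) else bb)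
      ((0 : Nat), (0 : Nat))
  if st.1 = 0 then 0 else (st.2 : Int) - (t.length : Int)

-- ===== PRECONDITION & SPEC =====
def Spec_find_reverse_substring_index (text : String) (word : String) (out : Int) : Prop := out = find_reverse_substring_index_alt text word
instance (text : String) (word : String) (out : Int) : Decidable (Spec_find_reverse_substring_index text word out) := by unfold Spec_find_reverse_substring_index; infer_instance

-- ===== CLAIM (what is proved, stated in full; the proofs are below) =====
def Claim_equal_find_reverse_substring_index : Prop := ∀ (text : String) (word : String), Dom_find_reverse_substring_index text word → Spec_find_reverse_substring_index text word (find_reverse_substring_index text word)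

-- ===== LEMMAS AND PROOFS =====

-- the length of the longest prefix of word occurring in t (0 if none)
def pvL (t w : List Char) : Nat :=
  Nat.findGreatest (fun l => 0 < l ∧ PySem.Chars.isIn (w.take l) t = true) w.length

-- the rightmost start of an occurrence of that longest prefix
def pvJ (t w : List Char) : Nat :=
  Nat.findGreatest (fun j => (w.take (pvL t w)).isPrefixOf (t.drop j) = true) t.length

lemma pvL_facts (t w : List Char) :
    pvL t w ≤ w.length ∧
    (pvL t w ≠ 0 → 0 < pvL t w ∧ PySem.Chars.isIn (w.take (pvL t w)) t = true) ∧
    (∀ l, pvL t w < l → l ≤ w.length →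
      ¬ (0 < l ∧ PySem.Chars.isIn (w.take l) t = true)) := by
  have h := (Nat.findGreatest_eq_iff
      (P := fun l => 0 < l ∧ PySem.Chars.isIn (w.take l) t = true)
      (k := w.length) (m := pvL t w)).1 rfl
  exact ⟨h.1, h.2.1, fun l h1 h2 => h.2.2 h1 h2⟩

lemma le_pvL {t w : List Char} {l : Nat} (h1 : l ≤ w.length) (h0 : 0 < l)
    (hIn : PySem.Chars.isIn (w.take l) t = true) : l ≤ pvL t w :=
  Nat.le_findGreatest h1 ⟨h0, hIn⟩

lemma pvJ_facts (t w : List Char) :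
    pvJ t w ≤ t.length ∧
    (pvJ t w ≠ 0 → (w.take (pvL t w)).isPrefixOf (t.drop (pvJ t w)) = true) ∧
    (∀ j, pvJ t w < j → j ≤ t.length →
      ¬ (w.take (pvL t w)).isPrefixOf (t.drop j) = true) := by
  have h := (Nat.findGreatest_eq_iff
      (P := fun j => (w.take (pvL t w)).isPrefixOf (t.drop j) = true)
      (k := t.length) (m := pvJ t w)).1 rfl
  exact ⟨h.1, h.2.1, fun j h1 h2 => h.2.2 h1 h2⟩

lemma le_pvJ {t w : List Char} {j : Nat} (hj : j ≤ t.length)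
    (hp : (w.take (pvL t w)).isPrefixOf (t.drop j) = true) : j ≤ pvJ t w :=
  Nat.le_findGreatest hj hp

lemma pvLcp_le (w s : List Char) : pvLcp w s ≤ w.length := by
  induction w generalizing s with
  | nil => cases s <;> simp [pvLcp]
  | cons a as ih =>
    cases s with
    | nil => simp [pvLcp]
    | cons b bs =>
      by_cases h : a = b <;> simp [pvLcp, h]
      exact ih bs

lemma le_pvLcp_iff (l : Nat) (w s : List Char) :
    l ≤ pvLcp w s ↔ l ≤ w.length ∧ w.take l <+: s := by
  induction w generalizing s l with
  | nil =>
    cases s <;> simp [pvLcp] <;> omega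
  | cons a as ih =>
    cases s with
    | nil =>
      simp only [pvLcp, List.prefix_nil, List.take_eq_nil_iff]
      constructor
      · intro h; omega
      · rintro ⟨h1, h2 | h2⟩ <;> simp_all
    | cons b bs =>
      by_cases h : a = b
      · subst h
        cases l with
        | zero => simp
        | succ l' =>
          have he : pvLcp (a :: as) (a :: bs) = pvLcp as bs + 1 := by simp [pvLcp]
          simp only [he, List.take_succ_cons, List.cons_prefix_cons, List.length_cons, true_and]
          rw [Nat.succ_le_succ_iff, Nat.succ_le_succ_iff, ih]
      · cases l with
        | zero => simp
        | succ l' =>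
          simp only [pvLcp, if_pos h, List.take_succ_cons, List.cons_prefix_cons, List.length_cons]
          constructor
          · omega
          · rintro ⟨_, h2, _⟩; exact absurd h2 h

lemma prefix_drop_lt {sub t : List Char} {i : Nat} (hsub : sub ≠ [])
    (hp : sub <+: t.drop i) : i < t.length := by
  by_contra h
  rw [List.drop_eq_nil_iff.2 (by omega)] at hp
  exact hsub (List.prefix_nil.1 hp)

lemma take_ne_nil {w : List Char} {l : Nat} (h0 : 0 < l) (hl : l ≤ w.length) :
    w.take l ≠ [] := by
  simp only [ne_eq, List.take_eq_nil_iff]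
  rintro (h | h)
  · omega
  · subst h; simp at hl; omega

lemma rfind_go_eq (t sub : List Char) (j : Nat) :
    PySem.Chars.rfind.go t sub j =
      if h : ∃ i, i ≤ j ∧ sub.isPrefixOf (t.drop i) = true
      then ((Nat.findGreatest (fun i => sub.isPrefixOf (t.drop i) = true) j : Nat) : Int)
      else -1 := by
  induction j with
  | zero =>
    by_cases hp : sub.isPrefixOf t = true
    · rw [dif_pos ⟨0, le_refl 0, by simpa using hp⟩]
      simp [PySem.Chars.rfind.go, hp, Nat.findGreatest]
    · rw [dif_neg (by rintro ⟨i, hi, h⟩; interval_cases i; simp_all)]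
      simp [PySem.Chars.rfind.go, hp]
  | succ j ih =>
    by_cases hp : sub.isPrefixOf (t.drop (j + 1)) = true
    · have hstep : PySem.Chars.rfind.go t sub (j + 1) = ((j : Int) + 1) := by
        simp [PySem.Chars.rfind.go, hp]
      rw [hstep, dif_pos ⟨j + 1, le_refl _, hp⟩, Nat.findGreatest_succ, if_pos hp]
      push_cast
      ring
    · have hstep : PySem.Chars.rfind.go t sub (j + 1) = PySem.Chars.rfind.go t sub j := by
        simp [PySem.Chars.rfind.go, hp]
      have hex : (∃ i, i ≤ j + 1 ∧ sub.isPrefixOf (t.drop i) = true) ↔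
          (∃ i, i ≤ j ∧ sub.isPrefixOf (t.drop i) = true) := by
        constructor
        · rintro ⟨i, hi, h⟩
          refine ⟨i, ?_, h⟩
          rcases Nat.lt_or_ge i (j + 1) with h' | h'
          · omega
          · exfalso; have : i = j + 1 := by omega
            subst this; exact hp h
        · rintro ⟨i, hi, h⟩; exact ⟨i, by omega, h⟩
      rw [hstep, ih]
      by_cases h : ∃ i, i ≤ j ∧ sub.isPrefixOf (t.drop i) = true
      · rw [dif_pos h, dif_pos (hex.2 h), Nat.findGreatest_succ, if_neg (by simp [hp])]
      · rw [dif_neg h, dif_neg (fun h' => h (hex.1 h'))]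

lemma rfind_eq (t sub : List Char) :
    PySem.Chars.rfind t sub =
      if h : ∃ i, i ≤ t.length ∧ sub.isPrefixOf (t.drop i) = true
      then ((Nat.findGreatest (fun i => sub.isPrefixOf (t.drop i) = true) t.length : Nat) : Int)
      else -1 :=
  rfind_go_eq t sub t.length

-- first-success shape of A's early-return fold
lemma foldl_opt (g : Int → Option Int) (xs : List Int) :
    xs.foldl (pvStep g) none = xs.findSome? g := by
  have haux : ∀ (v : Int) (ys : List Int), ys.foldl (pvStep g) (some v) = some v := by
    intro v ys; induction ys <;> simp_all [pvStep]
  induction xs with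
  | nil => rfl
  | cons x xs ih =>
    simp only [List.foldl_cons, List.findSome?_cons]
    cases hx : g x with
    | none => simpa [pvStep, hx] using ih
    | some v => simp [pvStep, hx, haux]

lemma findSome?_range_first {β : Type} (h : Nat → Option β) (m i₀ : Nat)
    (hnone : ∀ k, k < i₀ → k < m → h k = none) (hsome : i₀ < m → h i₀ ≠ none) :
    (List.range m).findSome? h = if i₀ < m then h i₀ else none := by
  by_cases him : i₀ < m
  · rw [if_pos him]
    have hm : m = i₀ + (m - i₀) := by omega
    rw [hm, List.range_add, List.findSome?_append]
    have h1 : (List.range i₀).findSome? h = none :=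
      List.findSome?_eq_none_iff.2 (fun k hk => hnone k (List.mem_range.1 hk) (by
        have := List.mem_range.1 hk; omega))
    rw [h1, Option.none_or]
    obtain ⟨r, hr⟩ : ∃ r, m - i₀ = r + 1 := ⟨m - i₀ - 1, by omega⟩
    rw [hr, List.range_succ_eq_map, List.map_cons, List.findSome?_cons]
    cases hh : h (i₀ + 0) with
    | none => exact absurd (by simpa using hh) (hsome him)
    | some v => simpa using hh.symm
  · rw [if_neg him]
    exact List.findSome?_eq_none_iff.2 (fun k hk => hnone k (by have := List.mem_range.1 hk; omega)
      (List.mem_range.1 hk))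

-- occurrence of a nonempty pattern somewhere iff at some i ≤ length
lemma exists_le_iff_isIn {sub t : List Char} (hsub : sub ≠ []) :
    (∃ i, i ≤ t.length ∧ sub.isPrefixOf (t.drop i) = true) ↔ PySem.Chars.isIn sub t = true := by
  rw [← PySem.Chars.exists_prefix_drop_iff_isIn]
  constructor
  · rintro ⟨i, _, h⟩; exact ⟨i, List.isPrefixOf_iff_prefix.1 h⟩
  · rintro ⟨i, h⟩
    exact ⟨i, le_of_lt (prefix_drop_lt hsub h), List.isPrefixOf_iff_prefix.2 h⟩

-- A computes the spec value
lemma A_eq_spec (text word : String) :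
    find_reverse_substring_index text word =
      (if pvL text.toList word.toList = 0 then 0
       else ((pvJ text.toList word.toList : Int) - (text.toList.length : Int))) := by
  set t := text.toList with ht
  set w := word.toList with hw
  set g : Int → Option Int := fun i =>
    let sub_word := PySem.List.slice w none (some ((w.length : Int) - i))
    let index := PySem.Chars.rfind t sub_word
    if index ≠ -1 then some (index - (t.length : Int)) else none with hg
  have hA : find_reverse_substring_index text word =
      ((List.range w.length).findSome? (fun (k : Nat) => g (k : Int))).getD 0 := by
    show ((PySem.List.pyRange 0 (w.length : Int)).foldl (pvStep g) none).getD 0 = _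
    rw [PySem.List.pyRange_zero_natCast, foldl_opt, List.findSome?_map]
    rfl
  have hgk : ∀ k, k < w.length → g (k : Int) =
      (if PySem.Chars.isIn (w.take (w.length - k)) t = true
       then some (((Nat.findGreatest
            (fun i => (w.take (w.length - k)).isPrefixOf (t.drop i) = true) t.length
            : Nat) : Int) - (t.length : Int))
       else none) := by
    intro k hk
    have hb : (0:Int) ≤ (w.length : Int) - (k : Int) := by omega
    have hslice : PySem.List.slice w none (some ((w.length : Int) - (k : Int)))
        = w.take (w.length - k) := by
      rw [PySem.List.slice_to w hb]
      congr 1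
      omega
    have hne : w.take (w.length - k) ≠ [] := take_ne_nil (by omega) (by omega)
    simp only [hg, hslice, rfind_eq]
    by_cases hIn : PySem.Chars.isIn (w.take (w.length - k)) t = true
    · rw [dif_pos ((exists_le_iff_isIn hne).2 hIn), if_pos hIn, if_pos (by omega)]
    · rw [dif_neg (fun h => hIn ((exists_le_iff_isIn hne).1 h)), if_neg hIn, if_neg (by simp)]
  obtain ⟨hLle, hLspec, hLgr⟩ := pvL_facts t w
  have hfirst : (List.range w.length).findSome? (fun (k : Nat) => g (k : Int)) =
      if w.length - pvL t w < w.length then g ((w.length - pvL t w : Nat) : Int) else none := by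
    apply findSome?_range_first
    · intro k hk hkm
      rw [hgk k hkm, if_neg]
      intro hIn
      exact hLgr (w.length - k) (by omega) (by omega) ⟨by omega, hIn⟩
    · intro hlt
      rw [hgk _ hlt]
      have hml : w.length - (w.length - pvL t w) = pvL t w := by omega
      rw [hml, if_pos (hLspec (by omega)).2]
      simp
  rw [hA, hfirst]
  by_cases hL0 : pvL t w = 0
  · rw [if_neg (by omega), if_pos hL0]
    rfl
  · have hlt : w.length - pvL t w < w.length := by omega
    rw [if_pos hlt, hgk _ hlt]
    have hml : w.length - (w.length - pvL t w) = pvL t w := by omega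
    rw [hml, if_pos (hLspec hL0).2, if_neg hL0]
    rfl

-- B's loop invariant and the same spec value
lemma B_eq_spec (text word : String) :
    find_reverse_substring_index_alt text word =
      (if pvL text.toList word.toList = 0 then 0
       else ((pvJ text.toList word.toList : Int) - (text.toList.length : Int))) := by
  set t := text.toList with ht
  set w := word.toList with hw
  set n := t.length with hn
  set f : Nat → Nat := fun j => pvLcp w (t.drop j) with hf
  set step : Nat × Nat → Nat → Nat × Nat := fun bb j =>
    let l := pvLcp w (t.drop j)
    if 0 < l ∧ bb.1 ≤ l then (l, j) else bb with hstep
  -- invariant after scanning range k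
  have hinv : ∀ k, k ≤ n →
      (∀ j < k, f j ≤ ((List.range k).foldl step (0, 0)).1) ∧
      (((List.range k).foldl step (0, 0)).1 = 0 → (List.range k).foldl step (0, 0) = (0, 0)) ∧
      (0 < ((List.range k).foldl step (0, 0)).1 →
        ((List.range k).foldl step (0, 0)).2 < k ∧
        f ((List.range k).foldl step (0, 0)).2 = ((List.range k).foldl step (0, 0)).1 ∧
        ∀ j, ((List.range k).foldl step (0, 0)).2 < j → j < k →
          f j < ((List.range k).foldl step (0, 0)).1) := by
    intro k hk
    induction k with
    | zero => simp
    | succ k ih =>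
      obtain ⟨ih1, ih2, ih3⟩ := ih (by omega)
      rw [List.range_succ, List.foldl_append, List.foldl_cons, List.foldl_nil]
      set bb := (List.range k).foldl step (0, 0) with hbb
      by_cases hc : 0 < f k ∧ bb.1 ≤ f k
      · have hc' : 0 < pvLcp w (t.drop k) ∧ bb.1 ≤ pvLcp w (t.drop k) := hc
        have hstepk : step bb k = (f k, k) := by
          simp only [hstep]
          rw [if_pos hc']
        rw [hstepk]
        refine ⟨?_, ?_, ?_⟩
        · intro j hj
          rcases Nat.lt_or_ge j k with h | h
          · exact le_trans (ih1 j h) hc.2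
          · have : j = k := by omega
            subst this; exact le_refl _
        · intro h0; exact absurd hc.1 (by omega)
        · intro _
          refine ⟨by omega, rfl, ?_⟩
          intro j hj1 hj2; omega
      · have hc' : ¬ (0 < pvLcp w (t.drop k) ∧ bb.1 ≤ pvLcp w (t.drop k)) := hc
        have hstepk : step bb k = bb := by
          simp only [hstep]
          rw [if_neg hc']
        rw [hstepk]
        have hfk : f k = 0 ∨ f k < bb.1 := by
          by_cases h1 : 0 < f k
          · right; push_neg at hc; have := hc h1; omega
          · left; omega
        refine ⟨?_, ih2, ?_⟩
        · intro j hj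
          rcases Nat.lt_or_ge j k with h | h
          · exact ih1 j h
          · have : j = k := by omega
            subst this
            rcases hfk with h | h <;> omega
        · intro h0
          obtain ⟨a1, a2, a3⟩ := ih3 h0
          refine ⟨by omega, a2, ?_⟩
          intro j hj1 hj2
          rcases Nat.lt_or_ge j k with h | h
          · exact a3 j hj1 h
          · have : j = k := by omega
            subst this
            rcases hfk with h | h <;> omega
  obtain ⟨inv1, inv2, inv3⟩ := hinv n (le_refl n)
  set bb := (List.range n).foldl step (0, 0) with hbb
  have hBval : find_reverse_substring_index_alt text word =
      (if bb.1 = 0 then 0 else (bb.2 : Int) - (n : Int)) := rfl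
  obtain ⟨hLle, hLspec, hLgr⟩ := pvL_facts t w
  -- the scan's best length is pvL
  have hL : pvL t w = bb.1 := by
    rcases Nat.eq_zero_or_pos bb.1 with h0 | h0
    · rcases Nat.eq_zero_or_pos (pvL t w) with hz | hpos
      · omega
      · exfalso
        obtain ⟨_, hIn⟩ := hLspec (by omega)
        obtain ⟨i, hp⟩ := (PySem.Chars.exists_prefix_drop_iff_isIn _ _).2 hIn
        have hi : i < n := prefix_drop_lt (take_ne_nil hpos hLle) hp
        have h1 : pvL t w ≤ f i := (le_pvLcp_iff _ w (t.drop i)).2 ⟨hLle, hp⟩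
        have := inv1 i hi
        omega
    · obtain ⟨a1, a2, a3⟩ := inv3 h0
      have hwit : w.take bb.1 <+: t.drop bb.2 := by
        have hb : bb.1 ≤ f bb.2 := by omega
        exact ((le_pvLcp_iff bb.1 w (t.drop bb.2)).1 hb).2
      have hble : bb.1 ≤ w.length := le_trans (le_of_eq a2.symm) (pvLcp_le w (t.drop bb.2))
      have h1 : bb.1 ≤ pvL t w := le_pvL hble h0
        ((PySem.Chars.exists_prefix_drop_iff_isIn _ _).1 ⟨bb.2, hwit⟩)
      have h2 : pvL t w ≤ bb.1 := by
        obtain ⟨hpos, hIn⟩ := hLspec (by omega)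
        obtain ⟨i, hp⟩ := (PySem.Chars.exists_prefix_drop_iff_isIn _ _).2 hIn
        have hi : i < n := prefix_drop_lt (take_ne_nil hpos hLle) hp
        have hfi : pvL t w ≤ f i := (le_pvLcp_iff _ w (t.drop i)).2 ⟨hLle, hp⟩
        have := inv1 i hi
        omega
      omega
  rw [hBval]
  rcases Nat.eq_zero_or_pos bb.1 with h0 | h0
  · rw [if_pos h0, if_pos (by omega)]
  · rw [if_neg (by omega), if_neg (by omega)]
    obtain ⟨a1, a2, a3⟩ := inv3 h0
    obtain ⟨hJle, hJspec, hJgr⟩ := pvJ_facts t w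
    have hble : bb.1 ≤ w.length := le_trans (le_of_eq a2.symm) (pvLcp_le w (t.drop bb.2))
    -- bb.2 is an occurrence of the longest prefix
    have hwit : (w.take (pvL t w)).isPrefixOf (t.drop bb.2) = true := by
      apply List.isPrefixOf_iff_prefix.2
      rw [hL]
      have hb : bb.1 ≤ f bb.2 := by omega
      exact ((le_pvLcp_iff bb.1 w (t.drop bb.2)).1 hb).2
    have h1 : bb.2 ≤ pvJ t w := le_pvJ (by omega) hwit
    have h2 : pvJ t w ≤ bb.2 := by
      by_contra hcon
      push_neg at hcon
      have hPJ : (w.take (pvL t w)).isPrefixOf (t.drop (pvJ t w)) = true :=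
        hJspec (by omega)
      have hJn : pvJ t w < n := by
        apply prefix_drop_lt (sub := w.take (pvL t w)) _ (List.isPrefixOf_iff_prefix.1 hPJ)
        exact take_ne_nil (by omega) (by omega)
      have hfJ : bb.1 ≤ f (pvJ t w) := by
        apply (le_pvLcp_iff _ w (t.drop (pvJ t w))).2
        refine ⟨hble, ?_⟩
        rw [← hL]
        exact List.isPrefixOf_iff_prefix.1 hPJ
      have := a3 (pvJ t w) hcon hJn
      omega
    have : pvJ t w = bb.2 := by omega
    rw [this]

-- ===== VERDICT (by name: the statement is the Claim_ definition above) =====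
theorem find_reverse_substring_index_spec : Claim_equal_find_reverse_substring_index := by
  intro text word _
  unfold Spec_find_reverse_substring_index
  rw [A_eq_spec, B_eq_spec]
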